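-- pv_equiv track=rewrite | github.com/S3nna13/Aurelius | src/security/threat_intel_correlator.py | cluster_domains
-- ===== SOURCE A (Python) =====
-- from collections import defaultdict
--
-- def cluster_domains(domain_list: list[str]) -> dict[str, list[str]]:
--     buckets: dict[str, list[str]] = defaultdict(list)
--     for d in domain_list:
--         if not d:
--             continue
--         name = d.strip().lower().rstrip(".")
--         parts = [p for p in name.split(".") if p]
--         if len(parts) < 2:
--             root = name
--         else:
--             # naive eTLD+1: take the last two labels.
--             root = ".".join(parts[-2:])
--         buckets[root].append(name)
--     out: dict[str, list[str]] = {}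
--     for k in sorted(buckets):
--         out[k] = sorted(set(buckets[k]))
--     return out
-- ===== SOURCE B (Python) =====
-- from itertools import groupby
--
-- def cluster_domains(domain_list: list[str]) -> dict[str, list[str]]:
--     pairs = []
--     for d in domain_list:
--         if not d:
--             continue
--         name = d.strip().lower().rstrip(".")
--         parts = [p for p in name.split(".") if p]
--         root = name if len(parts) < 2 else ".".join(parts[-2:])
--         pairs.append((root, name))
--     return {root: [n for _, n in grp]
--             for root, grp in groupby(sorted(set(pairs)), key=lambda p: p[0])}
-- ===== Notes on version B (the rewrite author's own statement) =====
-- stated objective: alternative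
-- what changed: B replaces A's per-root defaultdict bucketing followed by sorting the keys and sorting+deduping each bucket with a single global sorted(set(pairs)) over (root, name) tuples and one linear itertools.groupby pass that emits the grouped dict directly.
import Mathlib
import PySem

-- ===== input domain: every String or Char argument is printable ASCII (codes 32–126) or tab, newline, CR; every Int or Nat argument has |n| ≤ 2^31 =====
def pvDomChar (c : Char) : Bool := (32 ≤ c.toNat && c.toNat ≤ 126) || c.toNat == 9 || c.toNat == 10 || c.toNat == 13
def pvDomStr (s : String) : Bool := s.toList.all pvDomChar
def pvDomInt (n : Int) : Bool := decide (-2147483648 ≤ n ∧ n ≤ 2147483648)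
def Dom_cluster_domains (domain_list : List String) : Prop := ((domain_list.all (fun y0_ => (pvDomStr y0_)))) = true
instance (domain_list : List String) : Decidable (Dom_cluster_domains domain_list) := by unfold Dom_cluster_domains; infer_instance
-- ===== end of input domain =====

-- B replaces A's per-root bucketing dict + per-bucket sort with one global sorted(set(pairs)) and a linear groupby; objective: alternative decomposition, not speed.

-- shared normalization helper: the identical normalization lines of both Pythons
-- (strip/lower/rstrip('.')/split('.')/naive eTLD+1 root)

-- hand port of str.rstrip("."): drop trailing '.' characters (exact on all strings)
def pvRstripDots (s : String) : String :=
  String.ofList ((s.toList.reverse.dropWhile (fun c => c == '.')).reverse)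

def pvNorm (d : String) : String × String :=
  let name := pvRstripDots (PySem.Str.lower (PySem.Str.strip d))
  let parts := ((PySem.Str.split? name ".").getD []).filter (fun p => !(p == ""))
  let root := if parts.length < 2 then name
              else PySem.Str.join "." (PySem.List.slice parts (some (-2)) none)
  (root, name)

-- ===== PORT A =====
def cluster_domains (domain_list : List String) : List (String × List String) :=
  let buckets := domain_list.foldl
    (fun (b : PySem.Dict String (List String)) d =>
      if d = "" then b
      else
        let rn := pvNorm d
        b.modify rn.1 [] (fun l => l ++ [rn.2]))
    PySem.Dict.empty
  let out := (PySem.List.sorted buckets.keys (fun k => k)).foldl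
    (fun (o : PySem.Dict String (List String)) k =>
      o.insert k (PySem.List.sorted (PySem.Set.ofList (buckets.getD k [])) (fun n => n)))
    PySem.Dict.empty
  out.items

-- ===== PORT B =====
-- port of itertools.groupby over (root, name) pairs + the per-group name comprehension
def pvGroupby : List (String × String) → List (String × List String)
  | [] => []
  | p :: rest =>
    (p.1, p.2 :: (rest.takeWhile (fun q => q.1 == p.1)).map Prod.snd)
      :: pvGroupby (rest.dropWhile (fun q => q.1 == p.1))
  termination_by l => l.length
  decreasing_by simpa using Nat.lt_succ_of_le (List.length_dropWhile_le _ rest)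

def cluster_domains_alt (domain_list : List String) : List (String × List String) :=
  let pairs := domain_list.foldl
    (fun (acc : List (String × String)) d => if d = "" then acc else acc ++ [pvNorm d]) []
  pvGroupby (PySem.List.sorted2 (PySem.Set.ofList pairs) Prod.fst Prod.snd)

-- ===== PRECONDITION & SPEC =====
def Spec_cluster_domains (domain_list : List String) (out : List (String × List String)) : Prop := out = cluster_domains_alt domain_list
instance (domain_list : List String) (out : List (String × List String)) : Decidable (Spec_cluster_domains domain_list out) := by unfold Spec_cluster_domains; infer_instance

-- ===== CLAIM (what is proved, stated in full; the proofs are below) =====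
def Claim_equal_cluster_domains : Prop := ∀ (domain_list : List String), Dom_cluster_domains domain_list → Spec_cluster_domains domain_list (cluster_domains domain_list)

-- ===== LEMMAS AND PROOFS =====

-- the common (root, name) pair list both programs extract from the input
def pvPairs (xs : List String) : List (String × String) :=
  (xs.filter (fun d => !(d == ""))).map pvNorm

def pvNames (xs : List String) (k : String) : List String :=
  ((pvPairs xs).filter (fun p => p.1 == k)).map Prod.snd

def pvRoots (xs : List String) : List String :=
  PySem.List.sorted (PySem.Set.ofList ((pvPairs xs).map Prod.fst)) (fun k => k)

def pvVal (xs : List String) (k : String) : List String :=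
  PySem.List.sorted (PySem.Set.ofList (pvNames xs k)) (fun n => n)

-- the canonical result both programs compute
def pvCanon (xs : List String) : List (String × List String) :=
  (pvRoots xs).map (fun k => (k, pvVal xs k))

def pvFlat (xs : List String) : List (String × String) :=
  (pvRoots xs).flatMap (fun k => (pvVal xs k).map (fun n => (k, n)))

theorem pairs_fold (xs : List String) (acc : List (String × String)) :
    xs.foldl (fun acc d => if d = "" then acc else acc ++ [pvNorm d]) acc = acc ++ pvPairs xs := by
  induction xs generalizing acc with
  | nil => simp [pvPairs]
  | cons d t ih =>
    simp only [List.foldl_cons]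
    by_cases hd : d = "" <;> rw [ih] <;> simp [pvPairs, hd]

def pvBFold (ps : List (String × String)) (b : PySem.Dict String (List String)) :
    PySem.Dict String (List String) :=
  ps.foldl (fun b p => b.modify p.1 [] (fun l => l ++ [p.2])) b

theorem bucketsA_eq (xs : List String) (b : PySem.Dict String (List String)) :
    xs.foldl (fun (b : PySem.Dict String (List String)) d =>
      if d = "" then b
      else
        let rn := pvNorm d
        b.modify rn.1 [] (fun l => l ++ [rn.2])) b = pvBFold (pvPairs xs) b := by
  induction xs generalizing b with
  | nil => simp [pvPairs, pvBFold]
  | cons d t ih =>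
    simp only [List.foldl_cons]
    by_cases hd : d = "" <;> rw [ih] <;> simp [pvPairs, pvBFold, hd]

theorem getD_pvBFold (ps : List (String × String)) (b : PySem.Dict String (List String)) (k : String) :
    (pvBFold ps b).getD k [] = b.getD k [] ++ (ps.filter (fun p => p.1 == k)).map Prod.snd := by
  induction ps generalizing b with
  | nil => simp [pvBFold]
  | cons p t ih =>
    have h := ih (b.modify p.1 [] (fun l => l ++ [p.2]))
    simp only [pvBFold, List.foldl_cons] at h ⊢
    rw [h, PySem.Dict.modify, PySem.Dict.getD_insert, List.filter_cons]
    by_cases hk : k = p.1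
    · simp [hk]
    · have hb : (p.1 == k) = false := beq_eq_false_iff_ne.mpr (fun e => hk e.symm)
      simp [hk, hb]

theorem keys_pvBFold (ps : List (String × String)) :
    (pvBFold ps PySem.Dict.empty).keys = PySem.Set.ofList (ps.map Prod.fst) := by
  unfold pvBFold
  rw [PySem.Dict.keys_foldl_modify_key ps Prod.fst [] (fun _ p l => l ++ [p.2])]
  simp [PySem.Set.update_nil_left]

theorem items_fold_insert (K : List String) (g : String → List String)
    (d : PySem.Dict String (List String)) (hnd : K.Nodup)
    (hc : ∀ k ∈ K, d.contains k = false) :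
    (K.foldl (fun o k => o.insert k (g k)) d).items = d.items ++ K.map (fun k => (k, g k)) := by
  induction K generalizing d with
  | nil => simp
  | cons k K' ih =>
    obtain ⟨hk, hnd'⟩ := List.nodup_cons.mp hnd
    have hck : d.contains k = false := hc k (List.mem_cons_self ..)
    have hitems : (d.insert k (g k)).items = d.items ++ [(k, g k)] := by
      simp [PySem.Dict.insert, hck]
    simp only [List.foldl_cons]
    rw [ih (d.insert k (g k)) hnd' ?_, hitems]
    · simp
    · intro k' hk'
      have : (k' == k) = false := by
        simp only [beq_eq_false_iff_ne, ne_eq]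
        exact fun e => hk (e ▸ hk')
      simp [PySem.Dict.contains_insert, this, hc k' (List.mem_cons_of_mem _ hk')]

theorem A_eq_canon (xs : List String) : cluster_domains xs = pvCanon xs := by
  simp only [cluster_domains]
  rw [bucketsA_eq, keys_pvBFold]
  rw [items_fold_insert _ _ _ ?_ ?_]
  · rw [show (PySem.Dict.empty : PySem.Dict String (List String)).items = [] from rfl,
      List.nil_append]
    unfold pvCanon pvRoots
    apply List.map_congr_left
    intro k _
    rw [getD_pvBFold]
    simp [pvVal, pvNames, PySem.Dict.getD, PySem.Dict.get?, PySem.Dict.empty]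
  · exact ((PySem.List.sorted_perm _ _ _).nodup_iff).mpr (PySem.Set.nodup_ofList _)
  · intro k _
    rfl

theorem sorted2_eq_lex (ps : List (String × String)) :
    PySem.List.sorted2 ps Prod.fst Prod.snd =
      PySem.List.sorted ps (fun p => (toLex p : Lex (String × String))) := by
  have hfun : (fun (a b : String × String) =>
      (decide (a.1 < b.1) || (!decide (b.1 < a.1) && decide (a.2 < b.2)))) =
      (fun (a b : String × String) =>
        decide ((toLex a : Lex (String × String)) < toLex b)) := by
    funext a b
    rcases lt_trichotomy a.1 b.1 with h | h | h
    · simp [h, Prod.Lex.toLex_lt_toLex]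
    · simp [h, Prod.Lex.toLex_lt_toLex]
    · simp [lt_asymm h, h, h.ne', Prod.Lex.toLex_lt_toLex]
  simp only [PySem.List.sorted2, PySem.List.sorted]
  rw [hfun]
  simp

theorem mem_pvFlat (xs : List String) (p : String × String) :
    p ∈ pvFlat xs ↔ p ∈ pvPairs xs := by
  unfold pvFlat
  constructor
  · intro hp
    obtain ⟨k, _, hm⟩ := List.mem_flatMap.mp hp
    obtain ⟨n, hn, rfl⟩ := List.mem_map.mp hm
    have hn' : n ∈ pvNames xs k := by
      have := (PySem.List.mem_sorted _ _ _ _).mp hn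
      exact (PySem.Set.mem_ofList _ _).mp this
    obtain ⟨q, hq, rfl⟩ := List.mem_map.mp hn'
    obtain ⟨hq1, hq2⟩ := List.mem_filter.mp hq
    have hk : q.1 = k := by simpa using hq2
    simpa [← hk] using hq1
  · intro hp
    refine List.mem_flatMap.mpr ⟨p.1, ?_, ?_⟩
    · unfold pvRoots
      rw [PySem.List.mem_sorted, PySem.Set.mem_ofList]
      exact List.mem_map.mpr ⟨p, hp, rfl⟩
    · refine List.mem_map.mpr ⟨p.2, ?_, rfl⟩
      unfold pvVal
      rw [PySem.List.mem_sorted, PySem.Set.mem_ofList]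
      exact List.mem_map.mpr ⟨p, List.mem_filter.mpr ⟨hp, by simp⟩, rfl⟩

theorem pairwise_flat_aux (K : List String) (g : String → List String)
    (hK : K.Pairwise (· < ·)) (hg : ∀ k, (g k).Pairwise (· < ·)) :
    (K.flatMap (fun k => (g k).map (fun n => (k, n)))).Pairwise
      (fun a b => (toLex a : Lex (String × String)) < toLex b) := by
  induction K with
  | nil => simp
  | cons k K' ih =>
    obtain ⟨hlt, hK'⟩ := List.pairwise_cons.mp hK
    rw [List.flatMap_cons]
    apply List.pairwise_append.mpr
    refine ⟨?_, ih hK', ?_⟩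
    · rw [List.pairwise_map]
      refine (hg k).imp ?_
      intro a b h
      exact Prod.Lex.toLex_lt_toLex.mpr (Or.inr ⟨rfl, h⟩)
    · intro a ha b hb
      obtain ⟨n, _, rfl⟩ := List.mem_map.mp ha
      obtain ⟨k', hk', hm⟩ := List.mem_flatMap.mp hb
      obtain ⟨m, _, rfl⟩ := List.mem_map.mp hm
      exact Prod.Lex.toLex_lt_toLex.mpr (Or.inl (hlt k' hk'))

theorem pairwise_pvFlat (xs : List String) :
    (pvFlat xs).Pairwise (fun a b => (toLex a : Lex (String × String)) < toLex b) := by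
  unfold pvFlat pvRoots pvVal
  exact pairwise_flat_aux _ _ (PySem.List.sorted_ofList_pairwise_lt _)
    (fun k => PySem.List.sorted_ofList_pairwise_lt _)

theorem nodup_pvFlat (xs : List String) : (pvFlat xs).Nodup := by
  refine (pairwise_pvFlat xs).imp ?_
  intro a b h e
  rw [e] at h
  exact lt_irrefl _ h

theorem B_sorted_eq (xs : List String) :
    PySem.List.sorted (PySem.Set.ofList (pvPairs xs))
      (fun p => (toLex p : Lex (String × String))) = pvFlat xs := by
  apply PySem.List.sorted_eq_of_perm_of_pairwise_lt
  · refine (List.perm_ext_iff_of_nodup (nodup_pvFlat xs) (PySem.Set.nodup_ofList _)).mpr ?_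
    intro p
    rw [mem_pvFlat, PySem.Set.mem_ofList]
  · exact pairwise_pvFlat xs

theorem takeWhile_eq_self_of_all {α : Type} (p : α → Bool) (l : List α)
    (h : ∀ a ∈ l, p a = true) : l.takeWhile p = l := by
  induction l with
  | nil => rfl
  | cons a t ih =>
    rw [List.takeWhile_cons, h a (List.mem_cons_self ..)]
    simp [ih (fun b hb => h b (List.mem_cons_of_mem _ hb))]

theorem takeWhile_eq_nil_of_all {α : Type} (p : α → Bool) (l : List α)
    (h : ∀ a ∈ l, p a = false) : l.takeWhile p = [] := by
  cases l with
  | nil => rfl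
  | cons a t =>
    rw [List.takeWhile_cons, h a (List.mem_cons_self ..)]
    simp

theorem dropWhile_eq_nil_of_all {α : Type} (p : α → Bool) (l : List α)
    (h : ∀ a ∈ l, p a = true) : l.dropWhile p = [] := by
  induction l with
  | nil => rfl
  | cons a t ih =>
    rw [List.dropWhile_cons, h a (List.mem_cons_self ..)]
    simpa using ih (fun b hb => h b (List.mem_cons_of_mem _ hb))

theorem dropWhile_eq_self_of_all {α : Type} (p : α → Bool) (l : List α)
    (h : ∀ a ∈ l, p a = false) : l.dropWhile p = l := by
  cases l with
  | nil => rfl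
  | cons a t =>
    rw [List.dropWhile_cons, h a (List.mem_cons_self ..)]
    simp

theorem group_flat (K : List String) (g : String → List String)
    (hK : K.Pairwise (· < ·)) (hne : ∀ k ∈ K, g k ≠ []) :
    pvGroupby (K.flatMap (fun k => (g k).map (fun n => (k, n)))) = K.map (fun k => (k, g k)) := by
  induction K with
  | nil => simp [pvGroupby]
  | cons k K' ih =>
    obtain ⟨hlt, hK'⟩ := List.pairwise_cons.mp hK
    rcases hne0 : g k with _ | ⟨n, ns⟩
    · exact absurd hne0 (hne k (List.mem_cons_self ..))
    rw [List.flatMap_cons, hne0, List.map_cons, List.cons_append, pvGroupby]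
    have hall1 : ∀ q ∈ ns.map (fun n => (k, n)), ((q : String × String).1 == k) = true := by
      intro q hq
      obtain ⟨m, _, rfl⟩ := List.mem_map.mp hq
      simp
    have hall2 : ∀ q ∈ K'.flatMap (fun k => (g k).map (fun n => (k, n))),
        ((q : String × String).1 == k) = false := by
      intro q hq
      obtain ⟨k', hk', hm⟩ := List.mem_flatMap.mp hq
      obtain ⟨m, _, rfl⟩ := List.mem_map.mp hm
      simpa using (hlt k' hk').ne'
    rw [List.takeWhile_append, takeWhile_eq_self_of_all _ _ hall1,
      takeWhile_eq_nil_of_all _ _ hall2,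
      List.dropWhile_append, dropWhile_eq_nil_of_all _ _ hall1,
      dropWhile_eq_self_of_all _ _ hall2]
    simp [List.map_map, Function.comp_def,
      ih hK' (fun k' hk' => hne k' (List.mem_cons_of_mem _ hk'))]
    exact hne0.symm

theorem B_eq_canon (xs : List String) : cluster_domains_alt xs = pvCanon xs := by
  simp only [cluster_domains_alt]
  rw [pairs_fold, List.nil_append, sorted2_eq_lex, B_sorted_eq]
  unfold pvFlat pvCanon
  apply group_flat
  · exact PySem.List.sorted_ofList_pairwise_lt _
  · intro k hk hnil
    rw [pvVal, PySem.List.sorted_eq_nil_iff] at hnil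
    have hk' : k ∈ (pvPairs xs).map Prod.fst := by
      simpa [pvRoots, PySem.List.mem_sorted, PySem.Set.mem_ofList] using hk
    obtain ⟨p, hp, rfl⟩ := List.mem_map.mp hk'
    have hmem : p.2 ∈ PySem.Set.ofList (pvNames xs p.1) :=
      (PySem.Set.mem_ofList _ _).mpr
        (List.mem_map.mpr ⟨p, List.mem_filter.mpr ⟨hp, by simp⟩, rfl⟩)
    rw [hnil] at hmem
    simp at hmem

-- ===== VERDICT (by name: the statement is the Claim_ definition above) =====
theorem cluster_domains_spec : Claim_equal_cluster_domains := by
  intro xs _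
  unfold Spec_cluster_domains
  rw [A_eq_canon, B_eq_canon]
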